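-- pv_equiv track=rewrite | github.com/krammanya/AOIS | lab_2/minimization/base.py | merge_patterns
-- ===== SOURCE A (Python) =====
-- Pattern = tuple[int | None, ...]
--
-- def merge_patterns(left: Pattern, right: Pattern) -> Pattern | None:
--     differences = 0
--     merged: list[int | None] = []
--
--     for left_bit, right_bit in zip(left, right):
--         if left_bit == right_bit:
--             merged.append(left_bit)
--             continue
--
--         if left_bit is None or right_bit is None:
--             return None
--
--         differences += 1
--         merged.append(None)
--
--         if differences > 1:
--             return None
--
--     if differences != 1:
--         return None
--
--     return tuple(merged)
-- ===== SOURCE B (Python) =====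
-- def merge_patterns(left, right):
--     n = min(len(left), len(right))
--     diffs = [i for i in range(n) if left[i] != right[i]]
--     if len(diffs) != 1:
--         return None
--     i = diffs[0]
--     if left[i] is None or right[i] is None:
--         return None
--     merged = list(left[:n])
--     merged[i] = None
--     return tuple(merged)
-- ===== Notes on version B (the rewrite author's own statement) =====
-- stated objective: alternative
-- what changed: Replaces A's single accumulating early-exit pass (building merged while counting differences) with a find-then-construct decomposition: gather the differing indices in one scan, require exactly one, then build the result by slicing left and overwriting that index with None.
import Mathlib
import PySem

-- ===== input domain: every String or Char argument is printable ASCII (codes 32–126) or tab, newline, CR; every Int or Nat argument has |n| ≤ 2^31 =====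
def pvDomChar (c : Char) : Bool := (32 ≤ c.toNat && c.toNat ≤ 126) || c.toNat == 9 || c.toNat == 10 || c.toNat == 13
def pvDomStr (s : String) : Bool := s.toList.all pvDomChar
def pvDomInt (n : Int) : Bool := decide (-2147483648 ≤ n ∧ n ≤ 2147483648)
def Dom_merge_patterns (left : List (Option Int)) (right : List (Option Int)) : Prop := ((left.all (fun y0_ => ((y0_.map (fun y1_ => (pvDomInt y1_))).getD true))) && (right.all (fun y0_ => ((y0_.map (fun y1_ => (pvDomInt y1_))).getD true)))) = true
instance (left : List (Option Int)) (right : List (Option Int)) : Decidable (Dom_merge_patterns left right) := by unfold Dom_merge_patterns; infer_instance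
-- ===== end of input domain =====

-- B changes A's single accumulating early-exit pass into a find-the-differing-indices-then-construct
-- decomposition (alternative structure, same asymptotic cost).

-- ===== PORT A =====
-- the loop over zip(left, right), carrying the `differences` counter and the `merged` accumulator
def mergeALoop : List (Option Int × Option Int) → Int → List (Option Int) → Option (List (Option Int))
  | [], differences, merged => if differences ≠ 1 then none else some merged
  | (l, r) :: rest, differences, merged =>
    if l = r then mergeALoop rest differences (merged ++ [l])
    else if l = none ∨ r = none then none
    else
      let differences' := differences + 1
      if differences' > 1 then none
      else mergeALoop rest differences' (merged ++ [none])

def merge_patterns (left : List (Option Int)) (right : List (Option Int)) : Option (List (Option Int)) :=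
  mergeALoop (left.zip right) 0 []

-- ===== PORT B =====
def merge_patterns_alt (left : List (Option Int)) (right : List (Option Int)) : Option (List (Option Int)) :=
  let n := min left.length right.length
  let diffs := (List.range n).filter (fun i => left.getD i none ≠ right.getD i none)
  match diffs with
  | [i] =>
    if left.getD i none = none ∨ right.getD i none = none then none
    else some ((left.take n).set i none)
  | _ => none

-- ===== PRECONDITION & SPEC =====
def Spec_merge_patterns (left : List (Option Int)) (right : List (Option Int)) (out : Option (List (Option Int))) : Prop := out = merge_patterns_alt left right
instance (left : List (Option Int)) (right : List (Option Int)) (out : Option (List (Option Int))) : Decidable (Spec_merge_patterns left right out) := by unfold Spec_merge_patterns; infer_instance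

-- ===== CLAIM (what is proved, stated in full; the proofs are below) =====
def Claim_equal_merge_patterns : Prop := ∀ (left : List (Option Int)) (right : List (Option Int)), Dom_merge_patterns left right → Spec_merge_patterns left right (merge_patterns left right)

-- ===== LEMMAS AND PROOFS =====

-- common reference shape: recursion over the zipped pairs, two states
-- go0: no difference seen yet; go1: exactly one difference already seen
def go1 : List (Option Int × Option Int) → Option (List (Option Int))
  | [] => some []
  | (a, b) :: t => if a = b then (go1 t).map (a :: ·) else none

def go0 : List (Option Int × Option Int) → Option (List (Option Int))
  | [] => none
  | (a, b) :: t =>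
    if a = b then (go0 t).map (a :: ·)
    else if a = none ∨ b = none then none
    else (go1 t).map ((none : Option Int) :: ·)

theorem mergeALoop_one (ps : List (Option Int × Option Int)) :
    ∀ m, mergeALoop ps 1 m = (go1 ps).map (m ++ ·) := by
  induction ps with
  | nil => intro m; simp [mergeALoop, go1]
  | cons p t ih =>
    intro m
    obtain ⟨a, b⟩ := p
    by_cases hab : a = b
    · simp [mergeALoop, go1, hab, ih, Option.map_map, Function.comp_def]
    · by_cases hn : a = none ∨ b = none
      · simp [mergeALoop, go1, hab, hn]
      · simp [mergeALoop, go1, hab, hn]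

theorem mergeALoop_zero (ps : List (Option Int × Option Int)) :
    ∀ m, mergeALoop ps 0 m = (go0 ps).map (m ++ ·) := by
  induction ps with
  | nil => intro m; simp [mergeALoop, go0]
  | cons p t ih =>
    intro m
    obtain ⟨a, b⟩ := p
    by_cases hab : a = b
    · simp [mergeALoop, go0, hab, ih, Option.map_map, Function.comp_def]
    · by_cases hn : a = none ∨ b = none
      · simp [mergeALoop, go0, hab, hn]
      · simp [mergeALoop, go0, hab, hn, mergeALoop_one, Option.map_map, Function.comp_def]

theorem merge_patterns_eq_go0 (left right : List (Option Int)) :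
    merge_patterns left right = go0 (left.zip right) := by
  simp [merge_patterns, mergeALoop_zero]

-- go1 succeeds exactly on all-equal pair lists, returning the firsts
theorem go1_eq_some (t : List (Option Int × Option Int)) (h : ∀ p ∈ t, p.1 = p.2) :
    go1 t = some (t.map Prod.fst) := by
  induction t with
  | nil => simp [go1]
  | cons p t ih =>
    obtain ⟨a, b⟩ := p
    have hab : a = b := h (a, b) (by simp)
    simp [go1, hab, ih (fun q hq => h q (by simp [hq]))]

theorem go1_eq_none (t : List (Option Int × Option Int)) (p : Option Int × Option Int)
    (hp : p ∈ t) (hne : p.1 ≠ p.2) : go1 t = none := by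
  induction t with
  | nil => cases hp
  | cons q t ih =>
    obtain ⟨a, b⟩ := q
    rcases List.mem_cons.mp hp with h | h
    · subst h; simp [go1, hne]
    · by_cases hab : a = b <;> simp [go1, hab, ih h]

-- filter over range on a cons: head test plus shifted tail filter
theorem filter_range_succ_shift (n : Nat) (p : Nat → Bool) :
    (List.range (n + 1)).filter p
      = (if p 0 then [0] else []) ++ ((List.range n).filter (fun i => p (i + 1))).map (· + 1) := by
  rw [List.range_succ_eq_map, List.filter_cons]
  split_ifs with h <;> simp [List.filter_map, Function.comp_def]

-- B equals go0 of the zip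
theorem alt_eq_go0 (left : List (Option Int)) :
    ∀ right, merge_patterns_alt left right = go0 (left.zip right) := by
  induction left with
  | nil => intro right; simp [merge_patterns_alt, go0, List.zip]
  | cons a l ih =>
    intro right
    cases right with
    | nil => simp [merge_patterns_alt, go0, List.zip]
    | cons b r =>
      have hsh : (List.range (min l.length r.length + 1)).filter
            (fun i => decide ((a :: l).getD i none ≠ (b :: r).getD i none))
          = (if a ≠ b then [0] else []) ++
            ((List.range (min l.length r.length)).filter
              (fun i => decide (l.getD i none ≠ r.getD i none))).map (· + 1) := by
        rw [filter_range_succ_shift]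
        simp
      by_cases hab : a = b
      · subst hab
        show merge_patterns_alt (a :: l) (a :: r) = go0 ((a, a) :: l.zip r)
        rw [show go0 ((a, a) :: l.zip r) = (go0 (l.zip r)).map (a :: ·) by simp [go0]]
        rw [← ih r]
        simp only [merge_patterns_alt, List.length_cons]
        rw [show min l.length r.length + 1 = min (l.length + 1) (r.length + 1) by omega] at hsh
        rw [hsh]
        simp only [ne_eq, not_true_eq_false, if_false, List.nil_append]
        cases hf : (List.range (min l.length r.length)).filter
            (fun i => decide (l.getD i none ≠ r.getD i none)) with
        | nil => simp
        | cons j t =>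
          cases t with
          | nil =>
            simp only [List.getD]
            by_cases h : l[j]?.getD none = none ∨ r[j]?.getD none = none
            · simp [h]
            · simp [h]
          | cons k t => simp
      · show merge_patterns_alt (a :: l) (b :: r) = go0 ((a, b) :: l.zip r)
        simp only [merge_patterns_alt, List.length_cons]
        rw [show min l.length r.length + 1 = min (l.length + 1) (r.length + 1) by omega] at hsh
        rw [hsh]
        simp only [ne_eq, hab, not_false_eq_true, if_true]
        cases hf : (List.range (min l.length r.length)).filter
            (fun i => decide (l.getD i none ≠ r.getD i none)) with
        | nil =>
          -- no further difference: all zipped pairs are equal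
          have hall : ∀ p ∈ l.zip r, p.1 = p.2 := by
            intro p hp
            obtain ⟨i, hi, hget⟩ := List.getElem_of_mem hp
            rw [List.getElem_zip] at hget
            subst hget
            by_contra hne
            rw [List.length_zip] at hi
            have hil : i < l.length := lt_of_lt_of_le hi (min_le_left _ _)
            have hir : i < r.length := lt_of_lt_of_le hi (min_le_right _ _)
            have hin : i ∈ (List.range (min l.length r.length)).filter
                (fun i => decide (l.getD i none ≠ r.getD i none)) := by
              rw [List.mem_filter, List.mem_range]
              refine ⟨hi, ?_⟩
              rw [List.getD_eq_getElem _ _ hil, List.getD_eq_getElem _ _ hir]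
              simpa using hne
            rw [hf] at hin; cases hin
          have hfst : (l.zip r).map Prod.fst = l.take (min l.length r.length) := by
            rw [List.zip_eq_zip_take_min]
            exact List.map_fst_zip (by simp)
          simp only [go0]
          rw [go1_eq_some _ hall, hfst]
          by_cases hn : a = none ∨ b = none
          · simp [hab, hn]
          · simp [hab, hn, List.take_succ_cons, Nat.succ_min_succ]
        | cons j t =>
          -- a later difference exists too: both sides give none
          have hj : j ∈ (List.range (min l.length r.length)).filter
              (fun i => decide (l.getD i none ≠ r.getD i none)) := by rw [hf]; simp
          rw [List.mem_filter, List.mem_range] at hj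
          obtain ⟨hjn, hjd⟩ := hj
          have hjl : j < l.length := lt_of_lt_of_le hjn (min_le_left _ _)
          have hjr : j < r.length := lt_of_lt_of_le hjn (min_le_right _ _)
          have hlen : j < (l.zip r).length := by rw [List.length_zip]; omega
          have hmem : (l[j], r[j]) ∈ l.zip r := by
            have hget : (l.zip r)[j]'hlen = (l[j], r[j]) := List.getElem_zip
            exact hget ▸ List.getElem_mem hlen
          have hne : (l[j], r[j]).1 ≠ (l[j], r[j]).2 := by
            rw [List.getD_eq_getElem _ _ hjl, List.getD_eq_getElem _ _ hjr] at hjd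
            simpa using hjd
          simp only [go0]
          rw [go1_eq_none _ _ hmem hne]
          split_ifs <;> simp

-- ===== VERDICT (by name: the statement is the Claim_ definition above) =====
theorem merge_patterns_spec : Claim_equal_merge_patterns := by
  intro left right _
  unfold Spec_merge_patterns
  rw [merge_patterns_eq_go0, alt_eq_go0]
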